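-- pv_equiv track=rewrite | github.com/GuilhermeAureliano/programacao-1 | unidade7/inverte_triplas.py | inverte3a3
-- ===== SOURCE A (Python) =====
-- def inverte3a3(string):
--     lista, cont, s = [], 0, ''
--
--     for i in range(len(string)):
--         s += string[i]
--         cont += 1
--         if cont == 3:
--             lista.append(s) # Adiciona de 3 em 3 na lista
--             cont, s = 0, ''
--
--     retorno = ''
--     for i in range(len(lista) -1, -1, -1):
--         retorno += lista[i]
--     return retorno
-- ===== SOURCE B (Python) =====
-- def inverte3a3(string):
--     k = len(string) // 3
--     return ''.join(string[3*i:3*i+3] for i in range(k-1, -1, -1))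
-- ===== Notes on version B (the rewrite author's own statement) =====
-- stated objective: simpler
-- what changed: Replaces A's char-by-char accumulation into an intermediate chunk list plus a second backward index loop by a single backward pass over chunk indices k-1..0 joining slices string[3*i:3*i+3] (fewer passes and no per-character string concatenation).
import Mathlib
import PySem

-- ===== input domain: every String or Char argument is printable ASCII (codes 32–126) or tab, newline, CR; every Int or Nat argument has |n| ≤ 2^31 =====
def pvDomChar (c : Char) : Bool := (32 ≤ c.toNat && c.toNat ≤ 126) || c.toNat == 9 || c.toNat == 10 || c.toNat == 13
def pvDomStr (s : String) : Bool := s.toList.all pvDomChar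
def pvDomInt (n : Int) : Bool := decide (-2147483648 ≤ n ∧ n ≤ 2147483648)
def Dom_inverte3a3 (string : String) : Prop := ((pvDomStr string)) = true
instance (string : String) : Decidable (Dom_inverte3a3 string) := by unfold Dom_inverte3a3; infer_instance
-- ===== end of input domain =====

-- B replaces A's char-by-char accumulation plus a backward concatenation over an
-- intermediate list by a single backward pass over chunk indices using slice
-- arithmetic (objective: simpler).

-- ===== PORT A =====
def inverte3a3 (string : String) : String :=
  let cs := string.toList
  -- for i in range(len(string)): s += string[i]; cont += 1; if cont == 3: append, reset
  let st := (PySem.List.pyRange 0 (PySem.Str.len string) 1).foldl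
    (fun (acc : List (List Char) × Int × List Char) i =>
      let s := acc.2.2 ++ [PySem.List.pyGetD cs i ' ']
      let cont := acc.2.1 + 1
      if cont = 3 then (acc.1 ++ [s], 0, ([] : List Char)) else (acc.1, cont, s))
    ([], 0, [])
  -- for i in range(len(lista)-1, -1, -1): retorno += lista[i]
  let retorno := (PySem.List.pyRange ((st.1.length : Int) - 1) (-1) (-1)).foldl
    (fun r i => r ++ PySem.List.pyGetD st.1 i []) []
  String.ofList retorno

-- ===== PORT B =====
def inverte3a3_alt (string : String) : String :=
  let cs := string.toList
  let k := PySem.Int.floordiv (PySem.Str.len string) 3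
  String.ofList
    (((PySem.List.pyRange (k - 1) (-1) (-1)).map
      (fun i => PySem.List.slice cs (some (3 * i)) (some (3 * i + 3)))).flatten)

-- ===== PRECONDITION & SPEC =====
def Spec_inverte3a3 (string : String) (out : String) : Prop := out = inverte3a3_alt string
instance (string : String) (out : String) : Decidable (Spec_inverte3a3 string out) := by unfold Spec_inverte3a3; infer_instance

-- ===== CLAIM (what is proved, stated in full; the proofs are below) =====
def Claim_equal_inverte3a3 : Prop := ∀ (string : String), Dom_inverte3a3 string → Spec_inverte3a3 string (inverte3a3 string)

-- ===== LEMMAS AND PROOFS =====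

-- canonical 3-chunking of a char list, with running partial chunk s (proof-side helper)
def pvGo (s : List Char) : List Char → List (List Char)
  | [] => []
  | c :: cs =>
    if s.length = 2 then (s ++ [c]) :: pvGo [] cs
    else pvGo (s ++ [c]) cs

-- the leftover partial chunk of A's first loop (proof-side helper)
def pvRem (s : List Char) : List Char → List Char
  | [] => s
  | c :: cs => if s.length = 2 then pvRem [] cs else pvRem (s ++ [c]) cs

-- A's first loop (as a foldl over the characters) computes pvGo / pvRem
theorem pvLoop1 (cs : List Char) (lista : List (List Char)) (s : List Char) (hs : s.length < 3) :
    cs.foldl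
      (fun (acc : List (List Char) × Int × List Char) c =>
        let s' := acc.2.2 ++ [c]
        let cont := acc.2.1 + 1
        if cont = 3 then (acc.1 ++ [s'], 0, ([] : List Char)) else (acc.1, cont, s'))
      (lista, (s.length : Int), s) =
    (lista ++ pvGo s cs, ((pvRem s cs).length : Int), pvRem s cs) := by
  induction cs generalizing lista s with
  | nil => simp [pvGo, pvRem]
  | cons c cs ih =>
    by_cases h : s.length = 2
    · have hgo : pvGo s (c :: cs) = (s ++ [c]) :: pvGo [] cs := by simp [pvGo, h]
      have hrem : pvRem s (c :: cs) = pvRem [] cs := by simp [pvRem, h]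
      rw [hgo, hrem, List.foldl_cons]
      dsimp only
      rw [if_pos (by omega : ((s.length : Int) + 1 = 3))]
      have := ih (lista ++ [s ++ [c]]) [] (by simp)
      simpa using this
    · have hgo : pvGo s (c :: cs) = pvGo (s ++ [c]) cs := by simp [pvGo, h]
      have hrem : pvRem s (c :: cs) = pvRem (s ++ [c]) cs := by simp [pvRem, h]
      rw [hgo, hrem, List.foldl_cons]
      dsimp only
      rw [if_neg (by omega : ¬ ((s.length : Int) + 1 = 3))]
      have hlen : ((s ++ [c]).length : Int) = (s.length : Int) + 1 := by simp
      have := ih lista (s ++ [c]) (by simp; omega)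
      rw [← hlen]
      simpa using this

-- A's second loop: backward indexed concatenation is reverse-then-flatten
theorem pvLoop2 (lista : List (List Char)) (r : List Char) :
    (PySem.List.pyRange ((lista.length : Int) - 1) (-1) (-1)).foldl
      (fun acc i => acc ++ PySem.List.pyGetD lista i []) r =
    r ++ lista.reverse.flatten := by
  induction lista using List.reverseRecOn generalizing r with
  | nil => rw [PySem.List.pyRange_neg_one_eq_nil (by simp)]; simp
  | append_singleton ys y ih =>
    have hlen : ((ys ++ [y]).length : Int) - 1 = (ys.length : Int) := by simp
    rw [hlen, PySem.List.pyRange_neg_one_cons (by omega)]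
    simp only [List.foldl_cons]
    have hget : PySem.List.pyGetD (ys ++ [y]) (ys.length : Int) [] = y := by
      rw [PySem.List.pyGetD_eq_getElem (ys ++ [y]) [] (by omega) (by simp)]
      simp
    rw [hget]
    rw [PySem.List.foldl_congr_mem _
          (fun acc i => acc ++ PySem.List.pyGetD (ys ++ [y]) i [])
          (fun acc i => acc ++ PySem.List.pyGetD ys i []) (r ++ y) ?_]
    · rw [ih]; simp
    · intro acc i hi
      have hib := PySem.List.mem_pyRange_neg_one.mp hi
      have h0 : (0 : Int) ≤ i := by omega
      have h1 : i < (ys.length : Int) := by omega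
      dsimp only
      rw [PySem.List.pyGetD_eq_getElem ys [] h0 h1,
          PySem.List.pyGetD_eq_getElem (ys ++ [y]) [] h0 (by simp; omega)]
      rw [List.getElem_append_left (by omega)]

-- B's chunk list (forward order) is the canonical chunking
theorem pvChunksAux : ∀ (n : Nat) (cs : List Char), cs.length ≤ n →
    (List.range (cs.length / 3)).map (fun j => (cs.drop (3 * j)).take 3) = pvGo [] cs := by
  intro n
  induction n with
  | zero => intro cs h; interval_cases h' : cs.length; simp_all [List.length_eq_zero_iff, pvGo]
  | succ n ih =>
    intro cs h
    match cs with
    | [] => simp [pvGo]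
    | [a] => simp [pvGo]
    | [a, b] => simp [pvGo]
    | a :: b :: c :: rest =>
      have hlen : (a :: b :: c :: rest).length / 3 = rest.length / 3 + 1 := by
        simp; omega
      rw [hlen, List.range_succ_eq_map]
      simp only [List.map_cons, List.map_map]
      have hrest := ih rest (by simp at h; omega)
      have hpv : pvGo [] (a :: b :: c :: rest) = [a, b, c] :: pvGo [] rest := by
        simp [pvGo]
      rw [hpv]
      refine List.cons_eq_cons.mpr ⟨by simp, ?_⟩
      rw [← hrest]
      apply List.map_congr_left
      intro j _
      have hdrop : List.drop (3 * Nat.succ j) (a :: b :: c :: rest) = List.drop (3 * j) rest := by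
        have h3 : 3 * Nat.succ j = 3 * j + 3 := by omega
        rw [h3]; rfl
      simp only [Function.comp_apply, hdrop]

theorem pvChunks (cs : List Char) :
    (List.range (cs.length / 3)).map (fun j => (cs.drop (3 * j)).take 3) = pvGo [] cs :=
  pvChunksAux cs.length cs le_rfl

-- ===== VERDICT (by name: the statement is the Claim_ definition above) =====
theorem inverte3a3_spec : Claim_equal_inverte3a3 := by
  intro string _
  unfold Spec_inverte3a3 inverte3a3 inverte3a3_alt
  simp only [PySem.Str.len_eq]
  set cs := string.toList with hcs
  -- A, first loop
  rw [PySem.List.foldl_pyRange_zero_pyGetD' cs ' '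
      (fun (acc : List (List Char) × Int × List Char) c =>
        let s' := acc.2.2 ++ [c]
        let cont := acc.2.1 + 1
        if cont = 3 then (acc.1 ++ [s'], 0, ([] : List Char)) else (acc.1, cont, s'))
      ([], 0, [])]
  have h1 := pvLoop1 cs [] [] (by simp)
  simp only [List.length_nil, Nat.cast_zero, List.nil_append] at h1
  rw [h1]
  -- A, second loop
  rw [pvLoop2 (pvGo [] cs) []]
  -- B
  have hfd : PySem.Int.floordiv ((cs.length : Int)) 3 = ((cs.length / 3 : Nat) : Int) := by
    exact_mod_cast PySem.Int.floordiv_natCast cs.length 3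
  rw [hfd, PySem.List.pyRange_neg_one_eq_reverse]
  have ha : ((-1 : Int) + 1) = 0 := by norm_num
  have hk : (((cs.length / 3 : Nat) : Int) - 1 + 1) = ((cs.length / 3 : Nat) : Int) := by ring
  rw [ha, hk, PySem.List.pyRange_one]
  simp only [Int.sub_zero, Int.toNat_natCast, List.map_reverse, List.map_map, List.nil_append]
  congr 1
  rw [← pvChunks cs]
  congr 1
  congr 1
  apply List.map_congr_left
  intro j _
  have h3j : (3 * ((0 : Int) + (j : Int))) = ((3 * j : Nat) : Int) := by push_cast; ring
  simp only [Function.comp_apply, h3j]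
  rw [(by push_cast; ring :
        ((3 * j : Nat) : Int) + 3 = ((3 * j : Nat) : Int) + ((3 : Nat) : Int)),
      PySem.List.slice_natCast_add]
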